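-- pv_equiv track=rewrite | github.com/bionikspoon/python-design-patterns | state_pattern.py | output_parser
-- ===== SOURCE A (Python) =====
-- def output_parser(log_lines):
--     state = 'header'
--     program, end_time, send_failure = None, None, False
--
--     for line in log_lines:
--         if state == 'header':
--             program = line.split(', ', 1)[0]
--             state = 'body'
--         elif state == 'body':
--             if 'send_failure' in line:
--                 send_failure = True
--
--             if '======' in line:
--                 state = 'footer'
--         elif state == 'footer':
--             end_time = line.split(', ', 1)[0]
--     return program, end_time, send_failure
-- ===== SOURCE B (Python) =====
-- def output_parser(log_lines):
--     lines = list(log_lines)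
--     if not lines:
--         return None, None, False
--     program = lines[0].split(', ', 1)[0]
--     body = lines[1:]
--     sep = next((i for i, line in enumerate(body) if '======' in line), None)
--     if sep is None:
--         return program, None, any('send_failure' in line for line in body)
--     send_failure = any('send_failure' in line for line in body[:sep + 1])
--     footer = body[sep + 1:]
--     end_time = footer[-1].split(', ', 1)[0] if footer else None
--     return program, end_time, send_failure
-- ===== Notes on version B (the rewrite author's own statement) =====
-- stated objective: simpler
-- what changed: Replaced A's three-state machine fold with a direct decomposition: program from the first line, index of the first '======' line, any() over the slice up to and including it for send_failure, and the last line after it for end_time.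
import Mathlib
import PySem

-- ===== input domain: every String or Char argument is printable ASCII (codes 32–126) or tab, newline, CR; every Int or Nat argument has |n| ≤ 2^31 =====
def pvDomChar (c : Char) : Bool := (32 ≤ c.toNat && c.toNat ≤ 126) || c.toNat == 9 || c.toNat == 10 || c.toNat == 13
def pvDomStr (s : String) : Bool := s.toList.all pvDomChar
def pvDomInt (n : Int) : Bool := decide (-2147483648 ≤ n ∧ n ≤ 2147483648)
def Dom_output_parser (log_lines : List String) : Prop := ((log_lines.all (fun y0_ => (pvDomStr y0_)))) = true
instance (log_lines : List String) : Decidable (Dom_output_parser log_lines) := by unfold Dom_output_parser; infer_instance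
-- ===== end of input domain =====

-- B replaces A's three-state loop by a separator-index decomposition (first line / take / drop / last);
-- objective: simpler. Equivalence of return values is proved for all inputs (both are total).

-- line.split(', ', 1)[0] — split with a non-empty separator always yields a non-empty list,
-- so the getD defaults are never used.
def pvFirstField (line : String) : String :=
  (PySem.List.pyGet? ((PySem.Str.splitMax? line ", " 1).getD []) 0).getD ""

-- ===== PORT A =====
-- literal transliteration of A's state machine: fold over the lines with state ∈ {"header","body","footer"}
def pvStepA (acc : String × Option String × Option String × Bool) (line : String) :
    String × Option String × Option String × Bool :=
  let (state, program, end_time, send_failure) := acc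
  if state == "header" then
    ("body", some (pvFirstField line), end_time, send_failure)
  else if state == "body" then
    let send_failure := if PySem.Str.isIn "send_failure" line then true else send_failure
    let state := if PySem.Str.isIn "======" line then "footer" else state
    (state, program, end_time, send_failure)
  else if state == "footer" then
    (state, program, some (pvFirstField line), send_failure)
  else acc

def output_parser (log_lines : List String) : Option String × Option String × Bool :=
  let r := log_lines.foldl pvStepA ("header", none, none, false)
  (r.2.1, r.2.2.1, r.2.2.2)

-- ===== PORT B =====
-- transliteration of Source B: empty check, first field of line 0, findIdx? of the '======' line,
-- any over the slice up to it, last line of the slice after it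
def output_parser_alt (log_lines : List String) : Option String × Option String × Bool :=
  match log_lines with
  | [] => (none, none, false)
  | first :: body =>
    let program := some (pvFirstField first)
    match body.findIdx? (fun line => PySem.Str.isIn "======" line) with
    | none => (program, none, body.any (fun line => PySem.Str.isIn "send_failure" line))
    | some sep =>
      let send_failure :=
        (PySem.List.slice body none (some ((sep : Int) + 1))).any
          (fun line => PySem.Str.isIn "send_failure" line)
      let footer := PySem.List.slice body (some ((sep : Int) + 1)) none
      let end_time := match footer.getLast? with
        | some l => some (pvFirstField l)
        | none => none
      (program, end_time, send_failure)

-- ===== PRECONDITION & SPEC =====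
def Spec_output_parser (log_lines : List String) (out : Option String × Option String × Bool) : Prop := out = output_parser_alt log_lines
instance (log_lines : List String) (out : Option String × Option String × Bool) : Decidable (Spec_output_parser log_lines out) := by unfold Spec_output_parser; infer_instance

-- ===== CLAIM (what is proved, stated in full; the proofs are below) =====
def Claim_equal_output_parser : Prop := ∀ (log_lines : List String), Dom_output_parser log_lines → Spec_output_parser log_lines (output_parser log_lines)

-- ===== LEMMAS AND PROOFS =====

-- A's fold in the "footer" state: program and send_failure frozen, end_time tracks the last line.
lemma pvFoldFooter (xs : List String) (p : Option String) (e : Option String) (s : Bool) :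
    xs.foldl pvStepA ("footer", p, e, s) =
      ("footer", p, (match xs.getLast? with
        | some l => some (pvFirstField l)
        | none => e), s) := by
  induction xs generalizing e with
  | nil => rfl
  | cons a t ih =>
    simp only [List.foldl_cons, pvStepA]
    rw [show (("footer" : String) == "header") = false from rfl,
        show (("footer" : String) == "body") = false from rfl]
    simp only [Bool.false_eq_true, if_false, beq_self_eq_true, if_true, ih]
    cases t with
    | nil => rfl
    | cons b u =>
      cases hl : (b :: u).getLast? with
      | none => simp at hl
      | some l => rw [List.getLast?_cons_cons, hl]

-- A's fold in the "body" state, characterised by the index of the first '======' line.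
lemma pvFoldBody (xs : List String) (p : Option String) (e : Option String) (s : Bool) :
    xs.foldl pvStepA ("body", p, e, s) =
      (match xs.findIdx? (fun line => PySem.Str.isIn "======" line) with
        | none => ("body", p, e, s || xs.any (fun line => PySem.Str.isIn "send_failure" line))
        | some sep =>
          ("footer", p,
            (match (xs.drop (sep + 1)).getLast? with
              | some l => some (pvFirstField l)
              | none => e),
            s || (xs.take (sep + 1)).any (fun line => PySem.Str.isIn "send_failure" line))) := by
  induction xs generalizing s with
  | nil => simp
  | cons a t ih =>
    simp only [List.foldl_cons, pvStepA]
    rw [show (("body" : String) == "header") = false from rfl]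
    simp only [Bool.false_eq_true, if_false, beq_self_eq_true, if_true, List.findIdx?_cons]
    by_cases hsep : PySem.Str.isIn "======" a
    · simp only [hsep, if_true, pvFoldFooter]
      cases hsf : PySem.Str.isIn "send_failure" a <;> simp at hsf ⊢ <;> simp [hsf]
    · simp only [hsep, Bool.false_eq_true, if_false, ih]
      cases h : t.findIdx? (fun line => PySem.Str.isIn "======" line) with
      | none =>
        cases hsf : PySem.Str.isIn "send_failure" a <;> simp at hsf ⊢ <;>
          simp [hsf]
      | some i =>
        cases hsf : PySem.Str.isIn "send_failure" a <;> simp at hsf ⊢ <;>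
          simp [hsf]

theorem pvEq (log_lines : List String) :
    output_parser log_lines = output_parser_alt log_lines := by
  cases log_lines with
  | nil => rfl
  | cons first body =>
    simp only [output_parser, output_parser_alt, List.foldl_cons, pvStepA,
      beq_self_eq_true, if_true, pvFoldBody]
    cases h : body.findIdx? (fun line => PySem.Str.isIn "======" line) with
    | none => simp
    | some sep =>
      dsimp only
      rw [show ((sep : Int) + 1) = ((sep + 1 : Nat) : Int) by push_cast; ring]
      rw [PySem.List.slice_to_natCast, PySem.List.slice_from_natCast]
      cases hl : (body.drop (sep + 1)).getLast? <;> simp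

-- ===== VERDICT (by name: the statement is the Claim_ definition above) =====
theorem output_parser_spec : Claim_equal_output_parser := by
  intro log_lines _
  exact pvEq log_lines
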